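-- pv_equiv track=rewrite | github.com/pypi-data/pypi-mirror-330 | packages/opendrive-bssd-converter/opendrive_bssd_converter-2025.1.tar.gz/opendrive_bssd_converter-2025.1/src/integrate_BSSD_into_OpenDRIVE/algorithms/A_4_manually_edit_segments.py | get_elements_input
-- ===== SOURCE A (Python) =====
-- def get_elements_input(input_add_segments):
--     """
--     This function creates a list which contains the single elements of the user input in the variable "input_add_segments"/"input_remove_segments".
--     In this context, an element is generally a character from the passed user input.
--     There are two exceptions from this:
--         - Spaces are deleted
--         - Characters which are digits and belonging to one Number are joined to one element
--             --> e.g. Characters "2", "5", ".", "0" would result in one element "25.0"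
--     """
--
--     #List for storing single elements (e.g. comma, numbers) of input_add_segments
--     #--> deleting spaces and joining characters belonging to one number together
--     list_elements_input = []
--     #Variable for building a number out of multiple succeeding characters which contain a number
--     number = None
--
--     #Iteration through characters of passed input to store single elements of input in list_elements_input
--     for i, char in enumerate(input_add_segments):
--
--         #Skip spaces
--         if char == ' ':
--             continue
--
--         #Check if character is a number
--         elif char.isnumeric()==True:
--
--             #Check if last character was a number
--             #Case last character is no number
--             if number == None:
--                 number = char
--
--                 #Check if a succeeding char exists in input_add_segments
--                 if i<(len(input_add_segments)-1):
--
--                     #Check if succeeding char is not a number and not a decimal point "." (float value)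
--                     #If yes then current number is complete and can be added as an element to list
--                     if input_add_segments[i+1].isnumeric()==False and input_add_segments[i+1]!=".":
--                         list_elements_input.append(number)
--                         number = None
--
--                 #If no succeeding char exists, number is complete and can be added as an element to list
--                 else:
--                     list_elements_input.append(number)
--                 continue
--
--             #Case last character is a number
--             else:
--                 #If last character was a number, the current character is added to the number
--                 number = number + char
--
--                 #Check if succeeding char is not a number --> If yes then current number is complete and can be added as an element to list
--                 if i<(len(input_add_segments)-1):
--
--                     #Check if succeeding char is not a number and no decimal point "." (float value)
--                     if input_add_segments[i+1].isnumeric()==False and input_add_segments[i+1]!=".":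
--                         list_elements_input.append(number)
--                         number = None
--                 #If no succeeding char exists, number is complete and can be added as an element to list
--                 else:
--                     list_elements_input.append(number)
--                 continue
--
--         #Check if character is a decimal point "."
--         elif char==".":
--             #Check if last character was a number
--             #Case last character is no number
--             if number == None:
--                 list_elements_input.append(char)
--             else:
--
--                 #Check if a succeeding char exists in input_add_segments
--                 if i<(len(input_add_segments)-1):
--
--                     #Check if succeeding char is not a number
--                     #If yes then current number and the decimal point "." are added as separate elements to the list
--                     if input_add_segments[i+1].isnumeric()==False:
--                         list_elements_input.append(number)
--                         list_elements_input.append(char)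
--                         number = None
--                     #If no, the decimal point is added to the number
--                     else:
--                         #If last character was a number, the current character is added to the number
--                         number = number + char
--                 else:
--                     #No suceeding char exists --> Current number and the decimal point "." are added as separate elements to the list
--                     list_elements_input.append(number)
--                     list_elements_input.append(char)
--
--         #Add every character that is not a space or a number as a separate element to list
--         else:
--             list_elements_input.append(char)
--
--     return list_elements_input
-- ===== SOURCE B (Python) =====
-- def get_elements_input(input_add_segments):
--     """Deferred (lookbehind) state machine: a pending-dot flag and a number
--     accumulator instead of A's index lookahead."""
--     elements = []
--     number = None
--     pending_dot = False
--     for char in input_add_segments: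
--         # resolve a dot left pending after a number
--         if pending_dot:
--             pending_dot = False
--             if char.isnumeric():
--                 number = number + "."
--             else:
--                 elements.append(number)
--                 elements.append(".")
--                 number = None
--         if char == ' ':
--             if number is not None:
--                 elements.append(number)
--                 number = None
--         elif char.isnumeric():
--             number = char if number is None else number + char
--         elif char == '.':
--             if number is None:
--                 elements.append(".")
--             else:
--                 pending_dot = True
--         else:
--             if number is not None:
--                 elements.append(number)
--                 number = None
--             elements.append(char)
--     if pending_dot:
--         elements.append(number)
--         elements.append(".")
--     elif number is not None:
--         elements.append(number)
--     return elements
-- ===== Notes on version B (the rewrite author's own statement) =====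
-- stated objective: simpler
-- what changed: Replaces A's enumerate-with-index-lookahead (peeking at s[i+1] to decide when a number token is complete) by a deferred lookbehind state machine over the characters alone, carrying a number accumulator and a pending-dot flag and flushing tokens when the following character is processed.
import Mathlib
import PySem

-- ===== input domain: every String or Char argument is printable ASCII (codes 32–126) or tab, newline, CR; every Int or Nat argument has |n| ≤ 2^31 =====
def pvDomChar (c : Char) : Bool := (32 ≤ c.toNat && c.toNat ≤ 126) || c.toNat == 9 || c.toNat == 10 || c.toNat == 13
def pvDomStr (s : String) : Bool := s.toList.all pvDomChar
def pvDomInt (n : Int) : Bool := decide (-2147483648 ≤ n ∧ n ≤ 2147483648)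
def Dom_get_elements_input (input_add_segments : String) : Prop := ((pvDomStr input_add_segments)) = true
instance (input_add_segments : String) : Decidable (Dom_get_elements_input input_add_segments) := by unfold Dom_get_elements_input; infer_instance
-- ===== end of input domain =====

-- B replaces A's index-lookahead tokenizer (enumerate + s[i+1] peeking) by a deferred
-- lookbehind state machine with a pending-dot flag; objective: simpler, same cost.

-- char.isnumeric() — ported as isdigit, exact on the printable-ASCII domain
def pvIsNum (c : Char) : Bool := PySem.Chars.isdigit c

-- ===== PORT A =====
-- The for-loop over enumerate(s) with lookahead; structurally, the Python test
-- "i < len(s)-1" is "rest.head? = some _" and "s[i+1]" is that head, which is exact.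
def pvLoopA : List Char → List String → Option String → List String
  | [], acc, _ => acc
  | c :: rest, acc, number =>
    if c = ' ' then
      pvLoopA rest acc number
    else if pvIsNum c then
      match number with
      | none =>
        let n := String.ofList [c]
        match rest.head? with
        | some nxt =>
          if pvIsNum nxt = false ∧ nxt ≠ '.' then pvLoopA rest (acc ++ [n]) none
          else pvLoopA rest acc (some n)
        | none => pvLoopA rest (acc ++ [n]) (some n)
      | some m =>
        let n := m ++ String.ofList [c]
        match rest.head? with
        | some nxt =>
          if pvIsNum nxt = false ∧ nxt ≠ '.' then pvLoopA rest (acc ++ [n]) none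
          else pvLoopA rest acc (some n)
        | none => pvLoopA rest (acc ++ [n]) (some n)
    else if c = '.' then
      match number with
      | none => pvLoopA rest (acc ++ [String.ofList [c]]) none
      | some m =>
        match rest.head? with
        | some nxt =>
          if pvIsNum nxt = false then pvLoopA rest (acc ++ [m, String.ofList [c]]) none
          else pvLoopA rest acc (some (m ++ String.ofList [c]))
        | none => pvLoopA rest (acc ++ [m, String.ofList [c]]) (some m)
    else
      pvLoopA rest (acc ++ [String.ofList [c]]) number

def get_elements_input (input_add_segments : String) : List String :=
  pvLoopA input_add_segments.toList [] none

-- ===== PORT B =====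
-- end-of-loop flush of Source B
def pvFinB (out : List String) (num : Option String) (pend : Bool) : List String :=
  if pend then out ++ [num.getD "", "."]
  else match num with
       | some n => out ++ [n]
       | none => out

def pvLoopB : List Char → List String → Option String → Bool → List String
  | [], out, num, pend => pvFinB out num pend
  | c :: rest, out, num, pend =>
    -- resolve a pending dot first (pending_dot is only ever set with number ≠ None)
    let st :=
      if pend then
        match num with
        | some n => if pvIsNum c then (out, some (n ++ ".")) else (out ++ [n, "."], (none : Option String))
        | none => (out, (none : Option String))   -- unreachable: pending_dot implies number set
      else (out, num)
    let out := st.1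
    let num := st.2
    if c = ' ' then
      match num with
      | some n => pvLoopB rest (out ++ [n]) none false
      | none => pvLoopB rest out none false
    else if pvIsNum c then
      match num with
      | none => pvLoopB rest out (some (String.ofList [c])) false
      | some n => pvLoopB rest out (some (n ++ String.ofList [c])) false
    else if c = '.' then
      match num with
      | none => pvLoopB rest (out ++ ["."]) none false
      | some n => pvLoopB rest out (some n) true
    else
      match num with
      | some n => pvLoopB rest (out ++ [n, String.ofList [c]]) none false
      | none => pvLoopB rest (out ++ [String.ofList [c]]) none false

def get_elements_input_alt (input_add_segments : String) : List String :=
  pvLoopB input_add_segments.toList [] none false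

-- ===== PRECONDITION & SPEC =====
def Spec_get_elements_input (input_add_segments : String) (out : List String) : Prop := out = get_elements_input_alt input_add_segments
instance (input_add_segments : String) (out : List String) : Decidable (Spec_get_elements_input input_add_segments out) := by unfold Spec_get_elements_input; infer_instance

-- ===== CLAIM (what is proved, stated in full; the proofs are below) =====
def Claim_equal_get_elements_input : Prop := ∀ (input_add_segments : String), Dom_get_elements_input input_add_segments → Spec_get_elements_input input_add_segments (get_elements_input input_add_segments)

-- ===== LEMMAS AND PROOFS =====

-- A's loop state after a prefix, as a function of B's state and the upcoming character:
-- A has already flushed (or pre-joined) exactly what the lookahead told it to.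
def pvSync : Option Char → List String → Option String → Bool → List String × Option String
  | _, out, none, _ => (out, none)
  | nc, out, some n, false =>
    match nc with
    | some c => if pvIsNum c || c = '.' then (out, some n) else (out ++ [n], none)
    | none => (out ++ [n], none)
  | nc, out, some n, true =>
    match nc with
    | some c => if pvIsNum c then (out, some (n ++ ".")) else (out ++ [n, "."], none)
    | none => (out ++ [n, "."], none)

lemma pvKey : ∀ (cs : List Char) (out : List String) (num : Option String) (pend : Bool)
    (aNum : Option String),
    (pend = true → num.isSome) →
    (cs = [] ∨ aNum = (pvSync cs.head? out num pend).2) →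
    pvLoopA cs (pvSync cs.head? out num pend).1 aNum = pvLoopB cs out num pend := by
  intro cs
  induction cs with
  | nil =>
    intro out num pend aNum hp _
    cases num with
    | none => cases pend with
      | false => simp [pvLoopA, pvLoopB, pvSync, pvFinB]
      | true => simp at hp
    | some n => cases pend <;> simp [pvLoopA, pvLoopB, pvSync, pvFinB]
  | cons c rest ih =>
    intro out num pend aNum hp hA
    rcases hA with h | hA
    · exact absurd h (by simp)
    -- reusable step: convert a goal about the tail into an instance of ih
    have step : ∀ (aOut : List String) (aN : Option String) (out' : List String)
        (num' : Option String) (pend' : Bool),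
        (pend' = true → num'.isSome) →
        aOut = (pvSync rest.head? out' num' pend').1 →
        (rest = [] ∨ aN = (pvSync rest.head? out' num' pend').2) →
        pvLoopA rest aOut aN = pvLoopB rest out' num' pend' := by
      intro aOut aN out' num' pend' h1 h2 h3
      rw [h2]; exact ih out' num' pend' aN h1 h3
    -- A's numeric-char lookahead block, for any current number value n'
    have hlook : ∀ (out' : List String) (n' : String),
        (match rest.head? with
          | some nxt =>
            if pvIsNum nxt = false ∧ nxt ≠ '.' then pvLoopA rest (out' ++ [n']) none
            else pvLoopA rest out' (some n')
          | none => pvLoopA rest (out' ++ [n']) (some n'))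
        = pvLoopB rest out' (some n') false := by
      intro out' n'
      cases rest with
      | nil => simp [pvLoopA, pvLoopB, pvSync, pvFinB]
      | cons x rs =>
        by_cases hx : pvIsNum x = false ∧ x ≠ '.'
        · rcases hx with ⟨h1, h2⟩
          simp only [List.head?, if_pos (⟨h1, h2⟩ : pvIsNum x = false ∧ x ≠ '.')]
          exact step _ none _ (some n') false (by simp) (by simp [pvSync, h1, h2])
            (Or.inr (by simp [pvSync, h1, h2]))
        · have hx' : pvIsNum x = true ∨ x = '.' := by
            by_cases h : pvIsNum x = true
            · exact Or.inl h
            · right; by_contra hh; exact hx ⟨by simpa using h, hh⟩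
          simp only [List.head?, if_neg hx]
          rcases hx' with h | h <;>
            exact step _ (some n') _ (some n') false (by simp) (by simp [pvSync, h])
              (Or.inr (by simp [pvSync, h]))
    -- A's dot-after-number lookahead block
    have hlookDot : ∀ (out' : List String) (m : String),
        (match rest.head? with
          | some nxt =>
            if pvIsNum nxt = false then pvLoopA rest (out' ++ [m, "."]) none
            else pvLoopA rest out' (some (m ++ "."))
          | none => pvLoopA rest (out' ++ [m, "."]) (some m))
        = pvLoopB rest out' (some m) true := by
      intro out' m
      cases rest with
      | nil => simp [pvLoopA, pvLoopB, pvSync, pvFinB]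
      | cons x rs =>
        by_cases hx : pvIsNum x = true
        · simp only [List.head?, hx, Bool.true_eq_false, if_neg (by simp : ¬ (true = false))]
          rw [if_neg (by simp [hx])]
          exact step _ (some (m ++ ".")) _ (some m) true (by simp) (by simp [pvSync, hx])
            (Or.inr (by simp [pvSync, hx]))
        · have hx' : pvIsNum x = false := by simpa using hx
          simp only [List.head?]
          rw [if_pos hx']
          exact step _ none _ (some m) true (by simp) (by simp [pvSync, hx'])
            (Or.inr (by simp [pvSync, hx']))
    by_cases hsp : c = ' ' <;> by_cases hd : pvIsNum c = true <;> by_cases hdot : c = '.'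
    · exact absurd hd (by subst hsp; decide)
    · exact absurd hd (by subst hsp; decide)
    · exact absurd hdot (by subst hsp; decide)
    -- case c = ' '
    · subst hsp
      cases num with
      | none =>
        have hpf : pend = false := by
          cases pend
          · rfl
          · simpa using hp rfl
        subst hpf
        simp only [pvSync] at hA; subst hA
        simp only [pvSync, pvLoopA, pvLoopB, if_pos rfl]
        exact step out none out none false (by simp) (by cases rest <;> simp [pvSync])
          (by cases rest <;> simp [pvSync])
      | some n =>
        cases pend with
        | false =>
          have hs : pvSync (some ' ') out (some n) false = (out ++ [n], none) := by
            simp [pvSync, show pvIsNum ' ' = false from by decide]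
          rw [List.head?, hs] at hA; subst hA
          rw [List.head?, hs]
          simp only [pvLoopA, pvLoopB, if_pos rfl]
          exact step (out ++ [n]) none (out ++ [n]) none false (by simp)
            (by cases rest <;> simp [pvSync]) (by cases rest <;> simp [pvSync])
        | true =>
          have hs : pvSync (some ' ') out (some n) true = (out ++ [n, "."], none) := by
            simp [pvSync, show pvIsNum ' ' = false from by decide]
          rw [List.head?, hs] at hA; subst hA
          rw [List.head?, hs]
          simp only [pvLoopA, pvLoopB, if_pos rfl, if_true]
          rw [if_neg (by decide : ¬ (pvIsNum ' ' = true))]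
          exact step (out ++ [n, "."]) none (out ++ [n, "."]) none false (by simp)
            (by cases rest <;> simp [pvSync]) (by cases rest <;> simp [pvSync])
    · exact absurd hd (by subst hdot; decide)
    -- case pvIsNum c = true
    · cases num with
      | none =>
        have hpf : pend = false := by
          cases pend
          · rfl
          · simpa using hp rfl
        subst hpf
        simp only [pvSync] at hA; subst hA
        simp only [pvSync, pvLoopA, pvLoopB]
        simp only [if_neg hsp, hd, if_true]
        exact hlook out (String.ofList [c])
      | some n =>
        cases pend with
        | false =>
          have hs : pvSync (some c) out (some n) false = (out, some n) := by
            simp [pvSync, hd]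
          rw [List.head?, hs] at hA; subst hA
          rw [List.head?, hs]
          simp only [pvLoopA, pvLoopB]
          simp only [if_neg hsp, hd, if_true]
          exact hlook out (n ++ String.ofList [c])
        | true =>
          have hs : pvSync (some c) out (some n) true = (out, some (n ++ ".")) := by
            simp [pvSync, hd]
          rw [List.head?, hs] at hA; subst hA
          rw [List.head?, hs]
          simp only [pvLoopA, pvLoopB, if_true, hd, if_neg hsp]
          exact hlook out (n ++ "." ++ String.ofList [c])
    -- case c = '.'
    · subst hdot
      cases num with
      | none =>
        have hpf : pend = false := by
          cases pend
          · rfl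
          · simpa using hp rfl
        subst hpf
        simp only [pvSync] at hA; subst hA
        simp only [pvSync, pvLoopA, pvLoopB]
        simp only [if_neg (show ¬ pvIsNum '.' = true from by decide)]
        exact step _ none _ none false (by simp) (by cases rest <;> simp [pvSync])
          (by cases rest <;> simp [pvSync])
      | some n =>
        cases pend with
        | false =>
          have hs : pvSync (some '.') out (some n) false = (out, some n) := by
            simp [pvSync]
          rw [List.head?, hs] at hA; subst hA
          rw [List.head?, hs]
          simp only [pvLoopA, pvLoopB]
          simp only [if_neg (show ¬ pvIsNum '.' = true from by decide)]
          exact hlookDot out n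
        | true =>
          have hs : pvSync (some '.') out (some n) true = (out ++ [n, "."], none) := by
            simp [pvSync, show pvIsNum '.' = false from by decide]
          rw [List.head?, hs] at hA; subst hA
          rw [List.head?, hs]
          simp only [pvLoopA, pvLoopB, if_true]
          simp only [if_neg (show ¬ pvIsNum '.' = true from by decide)]
          exact step _ none _ none false (by simp) (by cases rest <;> simp [pvSync])
            (by cases rest <;> simp [pvSync])
    -- case: any other character
    · cases num with
      | none =>
        have hpf : pend = false := by
          cases pend
          · rfl
          · simpa using hp rfl
        subst hpf
        simp only [pvSync] at hA; subst hA
        simp only [pvSync, pvLoopA, pvLoopB, if_neg hsp, if_neg hdot,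
          if_neg (show ¬ pvIsNum c = true from hd)]
        exact step _ none _ none false (by simp) (by cases rest <;> simp [pvSync])
          (by cases rest <;> simp [pvSync])
      | some n =>
        cases pend with
        | false =>
          have hs : pvSync (some c) out (some n) false = (out ++ [n], none) := by
            simp [pvSync, hd, hdot]
          rw [List.head?, hs] at hA; subst hA
          rw [List.head?, hs]
          simp only [pvLoopA, pvLoopB, if_neg hsp, if_neg hdot,
            if_neg (show ¬ pvIsNum c = true from hd)]
          exact step _ none _ none false (by simp) (by cases rest <;> simp [pvSync])
            (by cases rest <;> simp [pvSync])
        | true =>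
          have hs : pvSync (some c) out (some n) true = (out ++ [n, "."], none) := by
            simp [pvSync, hd]
          rw [List.head?, hs] at hA; subst hA
          rw [List.head?, hs]
          simp only [pvLoopA, pvLoopB, if_true, if_neg hsp, if_neg hdot,
            if_neg (show ¬ pvIsNum c = true from hd)]
          exact step _ none _ none false (by simp) (by cases rest <;> simp [pvSync])
            (by cases rest <;> simp [pvSync])

-- ===== VERDICT (by name: the statement is the Claim_ definition above) =====
theorem get_elements_input_spec : Claim_equal_get_elements_input := by
  intro s _
  show get_elements_input s = get_elements_input_alt s
  unfold get_elements_input get_elements_input_alt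
  have h := pvKey s.toList [] none false none (by simp)
    (by cases s.toList <;> simp [pvSync])
  simpa [pvSync] using h
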